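-- pv_equiv track=rewrite | github.com/LiamTodd/algorithms-and-data-structures-store | 2024/code_signal/pairs_in_contig_arrays.py | solution_BAD
-- ===== SOURCE A (Python) =====
-- def solution_BAD(a, m, k):
--     # works, but too slow
--     count = 0
--     # iterate over subarrays
--     for start_index in range(0, len(a) - m + 1):
--         flag = True
--         # iterate through pairings in each subarray, with break conditions
--         for i in range(start_index, start_index + m - 1):
--             for j in range(i + 1, start_index + m):
--                 if i != j and a[i] + a[j] == k:
--                     count += 1
--                     flag = False
--                 if flag is False:
--                     break
--             if flag is False:
--                 break
--     return count
-- ===== SOURCE B (Python) =====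
-- def solution_BAD(a, m, k):
--     # A window shorter than 2 elements cannot contain a pair.
--     if m < 2:
--         return 0
--     # For each window, one left-to-right pass with a set of seen values:
--     # the window has a pair summing to k iff some element's complement was seen earlier.
--     count = 0
--     for s in range(len(a) - m + 1):
--         seen = set()
--         for x in a[s:s + m]:
--             if k - x in seen:
--                 count += 1
--                 break
--             seen.add(x)
--     return count
-- ===== Notes on version B (the rewrite author's own statement) =====
-- stated objective: faster
-- what changed: replaced the nested pair scan inside each window by a single pass with a hash set of seen values (complement lookup), removing the inner j-loop
import Mathlib
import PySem

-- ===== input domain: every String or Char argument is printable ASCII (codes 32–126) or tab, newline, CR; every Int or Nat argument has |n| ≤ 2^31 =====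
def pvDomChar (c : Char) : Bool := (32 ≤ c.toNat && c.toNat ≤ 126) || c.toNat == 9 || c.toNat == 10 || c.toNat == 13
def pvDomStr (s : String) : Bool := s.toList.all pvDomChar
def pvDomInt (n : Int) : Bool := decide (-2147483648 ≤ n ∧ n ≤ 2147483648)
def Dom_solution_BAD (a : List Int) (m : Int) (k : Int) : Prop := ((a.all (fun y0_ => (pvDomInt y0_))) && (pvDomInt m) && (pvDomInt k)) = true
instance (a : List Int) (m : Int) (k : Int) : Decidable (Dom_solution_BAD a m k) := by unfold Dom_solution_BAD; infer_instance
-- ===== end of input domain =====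

-- B replaces A's per-window nested pair scan by a single pass with a set of seen values
-- (complement lookup), removing the inner j-loop.

-- ===== PORT A =====
-- inner j-loop of A, with its flag/break logic; indices stay inside a whenever the loop
-- body runs, so pyGetD's default 0 is never read
def pvLoopJ (a : List Int) (k : Int) (i : Int) : List Int → Int × Bool → Int × Bool
  | [], cf => cf
  | j :: rest, (count, flag) =>
    let cf := if i ≠ j ∧ PySem.List.pyGetD a i 0 + PySem.List.pyGetD a j 0 = k
              then (count + 1, false) else (count, flag)
    if cf.2 = false then cf else pvLoopJ a k i rest cf

-- the i-loop of A ('hi' is start_index + m, the j-range bound)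
def pvLoopI (a : List Int) (k : Int) (hi : Int) : List Int → Int × Bool → Int × Bool
  | [], cf => cf
  | i :: rest, cf =>
    let cf' := pvLoopJ a k i (PySem.List.pyRange (i + 1) hi 1) cf
    if cf'.2 = false then cf' else pvLoopI a k hi rest cf'

def solution_BAD (a : List Int) (m : Int) (k : Int) : Int :=
  (PySem.List.pyRange 0 ((a.length : Int) - m + 1) 1).foldl
    (fun count s =>
      (pvLoopI a k (s + m) (PySem.List.pyRange s (s + m - 1) 1) (count, true)).1) 0

-- ===== PORT B =====
-- B's inner loop: scan the window once, keeping the set of seen values; +1 and break on a hit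
def pvWindowScan (k : Int) : List Int → Int → PySem.Set Int → Int
  | [], count, _ => count
  | x :: rest, count, seen =>
    if (k - x) ∈ seen then count + 1
    else pvWindowScan k rest count (PySem.Set.add seen x)

def solution_BAD_alt (a : List Int) (m : Int) (k : Int) : Int :=
  if m < 2 then 0
  else
    (PySem.List.pyRange 0 ((a.length : Int) - m + 1) 1).foldl
      (fun count s =>
        pvWindowScan k (PySem.List.slice a (some s) (some (s + m))) count PySem.Set.empty) 0

-- ===== PRECONDITION & SPEC =====
def Spec_solution_BAD (a : List Int) (m : Int) (k : Int) (out : Int) : Prop := out = solution_BAD_alt a m k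
instance (a : List Int) (m : Int) (k : Int) (out : Int) : Decidable (Spec_solution_BAD a m k out) := by unfold Spec_solution_BAD; infer_instance

-- ===== CLAIM (what is proved, stated in full; the proofs are below) =====
def Claim_equal_solution_BAD : Prop := ∀ (a : List Int) (m : Int) (k : Int), Dom_solution_BAD a m k → Spec_solution_BAD a m k (solution_BAD a m k)

-- ===== LEMMAS AND PROOFS =====

-- boolean "the j-loop finds a partner for i"
def pvHitJ (a : List Int) (k : Int) (i : Int) (hi : Int) : Bool :=
  (PySem.List.pyRange (i + 1) hi 1).any
    (fun j => decide (i ≠ j ∧ PySem.List.pyGetD a i 0 + PySem.List.pyGetD a j 0 = k))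

-- boolean "B's scan finds a hit", mirroring pvWindowScan
def pvScanHit (k : Int) (seen : PySem.Set Int) : List Int → Bool
  | [] => false
  | x :: rest => decide ((k - x) ∈ seen) || pvScanHit k (PySem.Set.add seen x) rest

lemma pvLoopJ_char (a : List Int) (k i : Int) (js : List Int) (c : Int) :
    pvLoopJ a k i js (c, true) =
      if js.any (fun j => decide (i ≠ j ∧ PySem.List.pyGetD a i 0 + PySem.List.pyGetD a j 0 = k))
      then (c + 1, false) else (c, true) := by
  induction js with
  | nil => simp [pvLoopJ]
  | cons j rest ih =>
    by_cases h : i ≠ j ∧ PySem.List.pyGetD a i 0 + PySem.List.pyGetD a j 0 = k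
    · simp [pvLoopJ, h]
    · simp [pvLoopJ, h, ih]

lemma pvLoopJ_char' (a : List Int) (k i hi : Int) (c : Int) :
    pvLoopJ a k i (PySem.List.pyRange (i + 1) hi 1) (c, true) =
      if pvHitJ a k i hi then (c + 1, false) else (c, true) := by
  rw [pvLoopJ_char]; rfl

lemma pvLoopI_char (a : List Int) (k hi : Int) (is : List Int) (c : Int) :
    pvLoopI a k hi is (c, true) =
      if is.any (fun i => pvHitJ a k i hi) then (c + 1, false) else (c, true) := by
  induction is with
  | nil => simp [pvLoopI]
  | cons i rest ih =>
    by_cases h : pvHitJ a k i hi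
    · simp [pvLoopI, pvLoopJ_char', h]
    · simp [pvLoopI, pvLoopJ_char', h, ih]

lemma pvWindowScan_char (k : Int) (w : List Int) (c : Int) (seen : PySem.Set Int) :
    pvWindowScan k w c seen = if pvScanHit k seen w then c + 1 else c := by
  induction w generalizing seen with
  | nil => simp [pvWindowScan, pvScanHit]
  | cons x rest ih =>
    by_cases h : (k - x) ∈ seen
    · simp [pvWindowScan, pvScanHit, h]
    · simp [pvWindowScan, pvScanHit, h, ih]

-- characterization of B's scan as an existential over positions
lemma pvScanHit_iff (k : Int) (seen : List Int) (w : List Int) :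
    pvScanHit k seen w = true ↔
      ∃ q : Nat, ∃ hq : q < w.length,
        ((k - w[q]) ∈ seen ∨ ∃ p : Nat, ∃ hp : p < q, w[p] + w[q] = k) := by
  induction w generalizing seen with
  | nil => simp [pvScanHit]
  | cons x rest ih =>
    by_cases h : (k - x) ∈ seen
    · simp only [pvScanHit, h, decide_true, Bool.true_or, true_iff]
      exact ⟨0, by simp, Or.inl (by simpa using h)⟩
    · simp only [pvScanHit, Bool.or_eq_true, decide_eq_true_eq]
      constructor
      · rintro (hx | hscan)
        · exact absurd hx h
        · obtain ⟨q, hq, hcase⟩ := (ih _).mp hscan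
          rcases hcase with hmem | ⟨p, hp, hsum⟩
          · rcases (PySem.Set.mem_add _ _ _).mp hmem with hseen | hx
            · exact ⟨q + 1, by simpa using Nat.succ_lt_succ hq, Or.inl (by simpa using hseen)⟩
            · refine ⟨q + 1, by simpa using Nat.succ_lt_succ hq,
                Or.inr ⟨0, Nat.succ_pos q, ?_⟩⟩
              simp only [List.getElem_cons_zero, List.getElem_cons_succ]
              omega
          · exact ⟨q + 1, by simpa using Nat.succ_lt_succ hq,
              Or.inr ⟨p + 1, Nat.succ_lt_succ hp, by simpa using hsum⟩⟩
      · rintro ⟨q, hq, hcase⟩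
        cases q with
        | zero =>
          rcases hcase with hmem | ⟨p, hp, _⟩
          · exact absurd (by simpa using hmem) h
          · exact absurd hp (Nat.not_lt_zero p)
        | succ q' =>
          right
          apply (ih _).mpr
          have hq' : q' < rest.length := by simpa using hq
          rcases hcase with hmem | ⟨p, hp, hsum⟩
          · exact ⟨q', hq', Or.inl ((PySem.Set.mem_add _ _ _).mpr (Or.inl (by simpa using hmem)))⟩
          · cases p with
            | zero =>
              refine ⟨q', hq', Or.inl ((PySem.Set.mem_add _ _ _).mpr (Or.inr ?_))⟩
              simp only [List.getElem_cons_zero, List.getElem_cons_succ] at hsum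
              omega
            | succ p' =>
              exact ⟨q', hq', Or.inr ⟨p', by omega, by simpa using hsum⟩⟩

-- per-window equality of the two hit tests (s a valid window start)
lemma pvWindow_eq (a : List Int) (m k s : Int) (hm : 2 ≤ m) (hs : 0 ≤ s)
    (hse : s + m ≤ (a.length : Int)) :
    (PySem.List.pyRange s (s + m - 1) 1).any (fun i => pvHitJ a k i (s + m)) =
      pvScanHit k PySem.Set.empty (PySem.List.slice a (some s) (some (s + m))) := by
  have hs' : s = ((s.toNat : Nat) : Int) := (Int.toNat_of_nonneg hs).symm
  have hm' : m = ((m.toNat : Nat) : Int) := (Int.toNat_of_nonneg (by omega)).symm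
  have hlen : s.toNat + m.toNat ≤ a.length := by omega
  have hslice : PySem.List.slice a (some s) (some (s + m)) = (a.drop s.toNat).take m.toNat := by
    rw [hs', hm', show (((s.toNat : Nat) : Int) + ((m.toNat : Nat) : Int)) =
      (((s.toNat + m.toNat : Nat)) : Int) by push_cast; ring, PySem.List.slice_natCast]
    congr 1
    omega
  have hwlen : ((a.drop s.toNat).take m.toNat).length = m.toNat := by simp; omega
  have hget : ∀ q : Nat, q < m.toNat →
      ((a.drop s.toNat).take m.toNat).getD q 0 = a.getD (s.toNat + q) 0 := by
    intro q hq
    rw [List.getD_eq_getElem?_getD, List.getElem?_take_of_lt hq, List.getElem?_drop,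
      List.getD_eq_getElem?_getD]
  rw [hslice, Bool.eq_iff_iff]
  rw [pvScanHit_iff]
  simp only [List.any_eq_true, PySem.List.mem_pyRange_one, pvHitJ, decide_eq_true_eq,
    PySem.Set.empty, List.not_mem_nil, false_or]
  constructor
  · rintro ⟨i, ⟨hi1, hi2⟩, j, ⟨hj1, hj2⟩, hne, hsum⟩
    have h0i : (0:Int) ≤ i := by omega
    have h0j : (0:Int) ≤ j := by omega
    rw [PySem.List.pyGetD_eq_getElem a 0 h0i (by omega),
      PySem.List.pyGetD_eq_getElem a 0 h0j (by omega)] at hsum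
    refine ⟨(j - s).toNat, by omega, (i - s).toNat, by omega, ?_⟩
    rw [← List.getD_eq_getElem _ 0, ← List.getD_eq_getElem _ 0,
      hget _ (by omega), hget _ (by omega),
      show s.toNat + (i - s).toNat = i.toNat by omega,
      show s.toNat + (j - s).toNat = j.toNat by omega,
      List.getD_eq_getElem _ 0 (by omega), List.getD_eq_getElem _ 0 (by omega)]
    exact hsum
  · rintro ⟨q, hq, p, hp, hsum⟩
    have hq' : q < m.toNat := by omega
    have hp' : p < m.toNat := by omega
    rw [← List.getD_eq_getElem _ 0, ← List.getD_eq_getElem _ 0,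
      hget _ hp', hget _ hq'] at hsum
    refine ⟨((s.toNat + p : Nat) : Int), by constructor <;> omega,
      ((s.toNat + q : Nat) : Int), ⟨by omega, by omega⟩, by omega, ?_⟩
    rw [PySem.List.pyGetD_eq_getElem a 0 (by omega) (by omega),
      PySem.List.pyGetD_eq_getElem a 0 (by omega) (by omega)]
    rw [← List.getD_eq_getElem _ 0 (by omega), ← List.getD_eq_getElem _ 0 (by omega),
      show (((s.toNat + p : Nat) : Int)).toNat = s.toNat + p by omega,
      show (((s.toNat + q : Nat) : Int)).toNat = s.toNat + q by omega]
    exact hsum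

-- ===== VERDICT (by name: the statement is the Claim_ definition above) =====
theorem solution_BAD_spec : Claim_equal_solution_BAD := by
  intro a m k _hdom
  unfold Spec_solution_BAD solution_BAD solution_BAD_alt
  by_cases hm : m < 2
  · simp only [hm, if_true]
    rw [PySem.List.foldl_congr_mem _ _ (fun (c : Int) (_ : Int) => c) 0
      (by
        intro c s _
        rw [PySem.List.pyRange_one_eq_nil (by omega)]
        rfl)]
    exact List.foldl_fixed _
  · simp only [hm, if_false]
    apply PySem.List.foldl_congr_mem
    intro c s hs
    rw [PySem.List.mem_pyRange_one] at hs
    rw [pvLoopI_char, pvWindowScan_char, ← pvWindow_eq a m k s (by omega) (by omega) (by omega)]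
    by_cases h : (PySem.List.pyRange s (s + m - 1) 1).any (fun i => pvHitJ a k i (s + m))
    · simp [h]
    · simp [h]
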